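-- pv_equiv track=rewrite | github.com/plus2047/ITPC | any/interview_250117.py | has_word
-- ===== SOURCE A (Python) =====
-- import heapq
--
-- def has_word(string, blacklist, whitelist):
--     whilte_matches = []
--     for word in whitelist:
--         if not word:
--             continue
--         start = 0
--         while start < len(string):
--             start = string.find(word, start)
--             if start == -1:
--                 break
--             whilte_matches.append((start, start + len(word)))
--             start += len(word)
--
--     black_matches = []
--     for word in blacklist:
--         if not word:
--             continue
--         start = 0
--         while start < len(string):
--             start = string.find(word, start)
--             if start == -1:
--                 break
--             black_matches.append((start, start + len(word)))
--             start += len(word)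
--
--     black_matches.sort()
--     whilte_matches.sort()
--
--     max_white_end_heap = []
--     current_whilte = 0
--
--     for black_start, black_end in black_matches:
--         # add all white matches that start before the black match
--         while current_whilte < len(whilte_matches) and whilte_matches[current_whilte][0] <= black_start:
--             white_start, white_end = whilte_matches[current_whilte]
--             heapq.heappush(max_white_end_heap, (-white_end, white_start))
--             current_whilte += 1
--
--         if not (max_white_end_heap and -max_white_end_heap[0][0] >= black_end):
--             return True
--
--     return False
-- ===== SOURCE B (Python) =====
-- def has_word(string, blacklist, whitelist):
--     # occurrences by direct position scan (no str.find): try each position, on a hit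
--     # jump by len(word) -- the same greedy non-overlapping matches A collects.
--     def occurrences(word):
--         out = []
--         i, n, m = 0, len(string), len(word)
--         while i + m <= n:
--             if string[i:i + m] == word:
--                 out.append((i, i + m))
--                 i += m
--             else:
--                 i += 1
--         return out
--
--     white = [m for w in whitelist if w for m in occurrences(w)]
--     black = [m for w in blacklist if w for m in occurrences(w)]
--     # a black match is bad iff no white match covers it
--     return any(not any(ws <= bs and be <= we for ws, we in white)
--                for bs, be in black)
-- ===== Notes on version B (the rewrite author's own statement) =====
-- stated objective: alternative
-- what changed: Matches are collected by a direct position-by-position slice-comparison scan instead of repeated str.find calls, and the sort + pointer + max-heap coverage sweep is replaced by a plain nested any() that checks each black match against the whole white-match list (no sorting, no heap).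
import Mathlib
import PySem

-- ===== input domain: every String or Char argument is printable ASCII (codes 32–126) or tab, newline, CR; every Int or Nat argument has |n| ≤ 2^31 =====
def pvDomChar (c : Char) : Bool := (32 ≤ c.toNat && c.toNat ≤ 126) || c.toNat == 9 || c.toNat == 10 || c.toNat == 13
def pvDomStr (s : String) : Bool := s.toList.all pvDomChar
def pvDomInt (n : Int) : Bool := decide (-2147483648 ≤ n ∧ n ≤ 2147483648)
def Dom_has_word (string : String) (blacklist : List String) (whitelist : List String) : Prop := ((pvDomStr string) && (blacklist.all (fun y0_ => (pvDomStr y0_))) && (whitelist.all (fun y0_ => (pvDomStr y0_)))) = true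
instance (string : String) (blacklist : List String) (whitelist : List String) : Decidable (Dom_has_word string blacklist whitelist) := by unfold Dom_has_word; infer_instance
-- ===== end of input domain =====

-- B collects matches by a position-by-position slice-comparison scan (no str.find) and
-- replaces A's sort + pointer + max-heap coverage sweep by a plain nested scan.

-- ===== PORT A =====
-- the inner 'while start < len(string): start = string.find(word, start); …' loop
def pvFindLoop (s w : List Char) (hw : w ≠ []) (start : Nat) : List (Int × Int) :=
  if hs : start < s.length then
    let f := PySem.Chars.findFrom s w (start : Int) none
    if hf : f = -1 then []
    else (f, f + (w.length : Int)) :: pvFindLoop s w hw (f.toNat + w.length)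
  else []
termination_by s.length - start
decreasing_by
  have h1 := (PySem.Chars.findFrom_natCast_spec s w start (le_of_lt hs) hf).1
  have h2 : start ≤ (PySem.Chars.findFrom s w (start : Int) none).toNat :=
    (Int.le_toNat (le_trans (Int.natCast_nonneg start) h1)).mpr h1
  have hw1 : 0 < w.length := List.length_pos_of_ne_nil hw
  exact Nat.sub_lt_sub_left hs (Nat.lt_of_le_of_lt h2 (Nat.lt_add_of_pos_right hw1))

-- 'for word in …: if not word: continue; <find loop, appending (start, start+len(word))>'
def pvCollect (s : List Char) (words : List String) : List (Int × Int) :=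
  words.foldl (fun acc word =>
    if hw : word.toList = [] then acc
    else acc ++ pvFindLoop s word.toList hw 0) []

-- A's sweep over the sorted black matches; the pointer into the sorted white list is the
-- remaining suffix 'ws' (takeWhile/dropWhile = the inner 'while … wm[cur][0] <= bs' pointer
-- advance); heapq is modelled by the list of pushed pairs (-white_end, white_start), with
-- heap[0] read as the heap's minimum element (what heapq guarantees for the root).
def pvSweep : List (Int × Int) → List (Int × Int) → List (Int × Int) → Bool
  | [], _heap, _ws => false
  | b :: rest, heap, ws =>
    let added := ws.takeWhile (fun w => decide (w.1 ≤ b.1))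
    let ws' := ws.dropWhile (fun w => decide (w.1 ≤ b.1))
    let heap' := added.foldl (fun h w => (-w.2, w.1) :: h) heap
    match PySem.List.min2? heap' Prod.fst Prod.snd with
    | none => true                                  -- 'not heap': return True
    | some top => if ¬ (-top.1 ≥ b.2) then true else pvSweep rest heap' ws'

def has_word (string : String) (blacklist : List String) (whitelist : List String) : Bool :=
  let s := string.toList
  let whilte_matches := pvCollect s whitelist
  let black_matches := pvCollect s blacklist
  let black_sorted := PySem.List.sorted2 black_matches Prod.fst Prod.snd
  let whilte_sorted := PySem.List.sorted2 whilte_matches Prod.fst Prod.snd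
  pvSweep black_sorted [] whilte_sorted

-- ===== PORT B =====
-- Source B's occurrences(word): 'while i + m <= n: if string[i:i+m] == word: append, i += m else i += 1';
-- 'string[i:i+m] == word' under the guard i+m ≤ n is exactly 'w <+: s.drop i'.
def altScan (s w : List Char) (hw : w ≠ []) (i : Nat) : List (Int × Int) :=
  if hb : i + w.length ≤ s.length then
    if w <+: s.drop i then
      ((i : Int), (i : Int) + (w.length : Int)) :: altScan s w hw (i + w.length)
    else altScan s w hw (i + 1)
  else []
termination_by s.length - i
decreasing_by
  · have hw1 : 0 < w.length := List.length_pos_of_ne_nil hw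
    omega
  · have hw1 : 0 < w.length := List.length_pos_of_ne_nil hw
    omega

-- the comprehension '[m for w in words if w for m in occurrences(w)]'
def altCollect (s : List Char) (words : List String) : List (Int × Int) :=
  words.flatMap (fun word =>
    if hw : word.toList = [] then [] else altScan s word.toList hw 0)

def has_word_alt (string : String) (blacklist : List String) (whitelist : List String) : Bool :=
  let s := string.toList
  let white := altCollect s whitelist
  let black := altCollect s blacklist
  black.any (fun b =>
    ! white.any (fun w => decide (w.1 ≤ b.1) && decide (b.2 ≤ w.2)))

-- ===== PRECONDITION & SPEC =====
def Spec_has_word (string : String) (blacklist : List String) (whitelist : List String) (out : Bool) : Prop := out = has_word_alt string blacklist whitelist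
instance (string : String) (blacklist : List String) (whitelist : List String) (out : Bool) : Decidable (Spec_has_word string blacklist whitelist out) := by unfold Spec_has_word; infer_instance

-- ===== CLAIM (what is proved, stated in full; the proofs are below) =====
def Claim_equal_has_word : Prop := ∀ (string : String) (blacklist : List String) (whitelist : List String), Dom_has_word string blacklist whitelist → Spec_has_word string blacklist whitelist (has_word string blacklist whitelist)

-- ===== LEMMAS AND PROOFS =====

-- ---- phase 1: the two match collectors produce the same list ----

lemma pv_altScan_nil (s w : List Char) (hw : w ≠ []) (i : Nat)
    (h : ∀ j, i ≤ j → ¬ w <+: s.drop j) : altScan s w hw i = [] := by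
  rw [altScan]
  split_ifs with hb hp
  · exact absurd hp (h i le_rfl)
  · exact pv_altScan_nil s w hw (i + 1) (fun j hj => h j (by omega))
  · rfl
termination_by s.length - i
decreasing_by
  have hw1 : 0 < w.length := List.length_pos_of_ne_nil hw
  omega

lemma pv_altScan_skip (s w : List Char) (hw : w ≠ []) (k : Nat) : ∀ (i : Nat),
    (∀ j, i ≤ j → j < i + k → ¬ w <+: s.drop j) →
    altScan s w hw i = altScan s w hw (i + k) := by
  induction k with
  | zero => intro i _; rfl
  | succ k ih =>
    intro i h
    have h0 : ¬ w <+: s.drop i := h i le_rfl (by omega)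
    have hstep : altScan s w hw i = altScan s w hw (i + 1) := by
      have hw1 : 0 < w.length := List.length_pos_of_ne_nil hw
      rw [altScan]
      by_cases hb : i + w.length ≤ s.length
      · rw [dif_pos hb, if_neg h0]
      · rw [dif_neg hb, altScan, dif_neg (by omega)]
    rw [hstep, ih (i + 1) (fun j hj1 hj2 => h j (by omega) (by omega))]
    congr 1
    omega

lemma pv_find_eq_scan (s w : List Char) (hw : w ≠ []) (start : Nat) :
    pvFindLoop s w hw start = altScan s w hw start := by
  have hw1 : 0 < w.length := List.length_pos_of_ne_nil hw
  rw [pvFindLoop]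
  split_ifs with hs
  · set f := PySem.Chars.findFrom s w (start : Int) none with hf
    by_cases h1 : f = -1
    · rw [dif_pos h1]
      have hninf : ¬ w <:+: s.drop start :=
        (PySem.Chars.findFrom_natCast_eq_neg_one_iff s w start (le_of_lt hs)).mp h1
      refine (pv_altScan_nil s w hw start ?_).symm
      intro j hj hpre
      apply hninf
      have : s.drop j = (s.drop start).drop (j - start) := by
        rw [List.drop_drop]; congr 1; omega
      rw [this] at hpre
      exact hpre.isInfix.trans (List.drop_suffix _ _).isInfix
    · rw [dif_neg h1]
      obtain ⟨hge, hpre, hmin⟩ := PySem.Chars.findFrom_natCast_spec s w start (le_of_lt hs) h1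
      have hf0 : 0 ≤ f := le_trans (Int.natCast_nonneg start) hge
      have hft : ((f.toNat : Int)) = f := Int.toNat_of_nonneg hf0
      have hsle : start ≤ f.toNat := (Int.le_toNat hf0).mpr hge
      have hlen : f.toNat + w.length ≤ s.length := by
        have := hpre.length_le
        rw [List.length_drop] at this
        omega
      have hskip : altScan s w hw start = altScan s w hw f.toNat := by
        have := pv_altScan_skip s w hw (f.toNat - start) start
          (fun j hj1 hj2 => hmin j hj1 (by omega))
        rw [this]; congr 1; omega
      rw [hskip, altScan, dif_pos hlen, if_pos hpre,
          pv_find_eq_scan s w hw (f.toNat + w.length), hft]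
  · have hs' : s.length ≤ start := by omega
    rw [altScan, dif_neg (by omega)]
termination_by s.length - start
decreasing_by
  have h2 : start ≤ (PySem.Chars.findFrom s w (start : Int) none).toNat := hsle
  omega

lemma pv_foldl_flatMap (s : List Char) (words : List String) : ∀ (acc : List (Int × Int)),
    words.foldl (fun acc word =>
      if hw : word.toList = [] then acc
      else acc ++ pvFindLoop s word.toList hw 0) acc
    = acc ++ words.flatMap (fun word =>
        if hw : word.toList = [] then [] else altScan s word.toList hw 0) := by
  induction words with
  | nil => intro acc; simp
  | cons word rest ih =>
    intro acc
    simp only [List.foldl_cons, List.flatMap_cons]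
    by_cases hw : word.toList = []
    · rw [dif_pos hw, dif_pos hw, ih, List.nil_append]
    · rw [dif_neg hw, dif_neg hw, ih, pv_find_eq_scan, List.append_assoc]

lemma pv_collect_eq (s : List Char) (words : List String) :
    pvCollect s words = altCollect s words := by
  unfold pvCollect altCollect
  rw [pv_foldl_flatMap, List.nil_append]

-- ---- phase 2: A's sorted sweep = 'some black match is covered by no white match' ----

-- lexicographic-≤ on pairs: the order 'list.sort()' / sorted2 … Prod.fst Prod.snd establishes
def pvLexLe (a b : Int × Int) : Prop := a.1 < b.1 ∨ (a.1 = b.1 ∧ a.2 ≤ b.2)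

lemma pv_insertBy_pairwise_lex (x : Int × Int) (ys : List (Int × Int))
    (h : ys.Pairwise pvLexLe) :
    (PySem.List.insertBy
      (fun a b => decide (a.1 < b.1) || (!decide (b.1 < a.1) && decide (a.2 < b.2))) x ys).Pairwise pvLexLe := by
  induction ys with
  | nil => simp [PySem.List.insertBy]
  | cons y t ih =>
    rcases List.pairwise_cons.mp h with ⟨hy, ht⟩
    by_cases hb : (decide (x.1 < y.1) || (!decide (y.1 < x.1) && decide (x.2 < y.2))) = true
    · rw [PySem.List.insertBy, if_pos hb]
      simp only [Bool.or_eq_true, Bool.and_eq_true, Bool.not_eq_true', decide_eq_true_eq,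
        decide_eq_false_iff_not] at hb
      refine List.pairwise_cons.mpr ⟨?_, h⟩
      intro z hz
      rcases List.mem_cons.mp hz with rfl | hz
      · unfold pvLexLe; omega
      · have := hy z hz
        unfold pvLexLe at *; omega
    · rw [PySem.List.insertBy, if_neg hb]
      simp only [Bool.or_eq_true, Bool.and_eq_true, Bool.not_eq_true', decide_eq_true_eq,
        decide_eq_false_iff_not, not_or, not_and] at hb
      refine List.pairwise_cons.mpr ⟨?_, ih ht⟩
      intro z hz
      rcases (PySem.List.insertBy_mem_iff _ x z t).mp hz with rfl | hz
      · unfold pvLexLe; omega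
      · exact hy z hz

lemma pv_foldl_insertBy_pairwise (xs : List (Int × Int)) : ∀ (acc : List (Int × Int)),
    acc.Pairwise pvLexLe →
    (xs.foldl (fun acc x => PySem.List.insertBy
      (fun a b => decide (a.1 < b.1) || (!decide (b.1 < a.1) && decide (a.2 < b.2))) x acc) acc).Pairwise pvLexLe := by
  induction xs with
  | nil => intro acc h; simpa using h
  | cons x t ih =>
    intro acc h
    exact ih _ (pv_insertBy_pairwise_lex x acc h)

lemma pv_sorted2_pairwise_fst (xs : List (Int × Int)) :
    (PySem.List.sorted2 xs Prod.fst Prod.snd).Pairwise (fun a b => a.1 ≤ b.1) := by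
  have h : (PySem.List.sorted2 xs Prod.fst Prod.snd).Pairwise pvLexLe := by
    have := pv_foldl_insertBy_pairwise xs [] List.Pairwise.nil
    simpa [PySem.List.sorted2] using this
  exact h.imp (by intro a b hab; unfold pvLexLe at hab; omega)

-- the accumulator step of PySem.List.min2? (specialised to fst/snd keys on Int × Int)
def pvMinStep (acc : Option (Int × Int)) (x : Int × Int) : Option (Int × Int) :=
  match acc with
  | none => some x
  | some mm => if (decide (x.1 < mm.1) || !decide (mm.1 < x.1) && decide (x.2 < mm.2)) = true then some x else some mm

lemma pv_min2_eq_foldl (xs : List (Int × Int)) :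
    PySem.List.min2? xs Prod.fst Prod.snd = xs.foldl pvMinStep none := by
  unfold PySem.List.min2?
  congr 1
  funext acc x
  cases acc <;> rfl

lemma pv_min2_aux (xs : List (Int × Int)) : ∀ (acc : Option (Int × Int)) (m : Int × Int),
    xs.foldl pvMinStep acc = some m →
    (m ∈ xs ∨ acc = some m) ∧ (∀ p ∈ xs, m.1 ≤ p.1) ∧ (∀ a, acc = some a → m.1 ≤ a.1) := by
  induction xs with
  | nil =>
    intro acc m h
    simp only [List.foldl_nil] at h
    refine ⟨Or.inr h, by simp, ?_⟩
    intro a ha; rw [h] at ha; cases ha; omega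
  | cons x t ih =>
    intro acc m h
    simp only [List.foldl_cons] at h
    rcases acc with _ | a
    · rw [show pvMinStep none x = some x from rfl] at h
      rcases ih (some x) m h with ⟨h1, h2, h3⟩
      have hx : m.1 ≤ x.1 := h3 x rfl
      refine ⟨?_, ?_, by intro a ha; cases ha⟩
      · rcases h1 with h1 | h1
        · exact Or.inl (List.mem_cons_of_mem _ h1)
        · cases h1; exact Or.inl (List.mem_cons_self)
      · intro p hp
        rcases List.mem_cons.mp hp with rfl | hp
        · exact hx
        · exact h2 p hp
    · rw [show pvMinStep (some a) x
          = if (decide (x.1 < a.1) || !decide (a.1 < x.1) && decide (x.2 < a.2)) = true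
            then some x else some a from rfl] at h
      by_cases hc : (decide (x.1 < a.1) || !decide (a.1 < x.1) && decide (x.2 < a.2)) = true
      · rw [if_pos hc] at h
        simp only [Bool.or_eq_true, Bool.and_eq_true, Bool.not_eq_true', decide_eq_true_eq,
          decide_eq_false_iff_not] at hc
        rcases ih (some x) m h with ⟨h1, h2, h3⟩
        have hx : m.1 ≤ x.1 := h3 x rfl
        refine ⟨?_, ?_, ?_⟩
        · rcases h1 with h1 | h1
          · exact Or.inl (List.mem_cons_of_mem _ h1)
          · cases h1; exact Or.inl (List.mem_cons_self)
        · intro p hp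
          rcases List.mem_cons.mp hp with rfl | hp
          · exact hx
          · exact h2 p hp
        · intro b hb; cases hb; omega
      · rw [if_neg hc] at h
        simp only [Bool.or_eq_true, Bool.and_eq_true, Bool.not_eq_true', decide_eq_true_eq,
          decide_eq_false_iff_not, not_or, not_and] at hc
        rcases ih (some a) m h with ⟨h1, h2, h3⟩
        have ha : m.1 ≤ a.1 := h3 a rfl
        refine ⟨?_, ?_, ?_⟩
        · rcases h1 with h1 | h1
          · exact Or.inl (List.mem_cons_of_mem _ h1)
          · exact Or.inr h1
        · intro p hp
          rcases List.mem_cons.mp hp with rfl | hp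
          · omega
          · exact h2 p hp
        · intro b hb; cases hb; exact ha

-- the heap root: min2? of a nonempty list is a member with minimal first component
lemma pv_min2_some (xs : List (Int × Int)) (m : Int × Int)
    (h : PySem.List.min2? xs Prod.fst Prod.snd = some m) :
    m ∈ xs ∧ ∀ p ∈ xs, m.1 ≤ p.1 := by
  rw [pv_min2_eq_foldl] at h
  rcases pv_min2_aux xs none m h with ⟨h1, h2, _⟩
  refine ⟨?_, h2⟩
  rcases h1 with h1 | h1
  · exact h1
  · cases h1

lemma pv_foldl_min2_ne_none (t : List (Int × Int)) : ∀ (a : Int × Int),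
    t.foldl pvMinStep (some a) ≠ none := by
  induction t with
  | nil => intro a; simp
  | cons x t ih =>
    intro a
    simp only [List.foldl_cons]
    rw [show pvMinStep (some a) x
        = if (decide (x.1 < a.1) || !decide (a.1 < x.1) && decide (x.2 < a.2)) = true
          then some x else some a from rfl]
    by_cases hc : (decide (x.1 < a.1) || !decide (a.1 < x.1) && decide (x.2 < a.2)) = true
    · rw [if_pos hc]; exact ih x
    · rw [if_neg hc]; exact ih a

lemma pv_min2_none (xs : List (Int × Int))
    (h : PySem.List.min2? xs Prod.fst Prod.snd = none) : xs = [] := by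
  rw [pv_min2_eq_foldl] at h
  cases xs with
  | nil => rfl
  | cons x t =>
    exfalso
    rw [List.foldl_cons] at h
    exact pv_foldl_min2_ne_none t x h

-- membership in the heap after the pointer advance pushed the whites in 'added'
lemma pv_mem_foldl_push (added : List (Int × Int)) : ∀ (heap : List (Int × Int)) (q : Int × Int),
    (q ∈ added.foldl (fun h w => (-w.2, w.1) :: h) heap ↔ q ∈ heap ∨ ∃ w ∈ added, q = (-w.2, w.1)) := by
  induction added with
  | nil => intro heap q; simp
  | cons w t ih =>
    intro heap q
    simp only [List.foldl_cons, ih, List.mem_cons, List.mem_cons]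
    constructor
    · rintro ((rfl | hq) | ⟨w', hw', rfl⟩)
      · exact Or.inr ⟨w, Or.inl rfl, rfl⟩
      · exact Or.inl hq
      · exact Or.inr ⟨w', Or.inr hw', rfl⟩
    · rintro (hq | ⟨w', (rfl | hw'), rfl⟩)
      · exact Or.inl (Or.inr hq)
      · exact Or.inl (Or.inl rfl)
      · exact Or.inr ⟨w', hw', rfl⟩

lemma pv_dropWhile_gt (bs : Int) (ws : List (Int × Int))
    (h : ws.Pairwise (fun a b => a.1 ≤ b.1)) :
    ∀ w ∈ ws.dropWhile (fun w => decide (w.1 ≤ bs)), ¬ w.1 ≤ bs := by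
  induction ws with
  | nil => simp
  | cons w t ih =>
    rcases List.pairwise_cons.mp h with ⟨hw, ht⟩
    by_cases hp : (decide (w.1 ≤ bs)) = true
    · rw [List.dropWhile_cons, if_pos hp]
      exact ih ht
    · rw [List.dropWhile_cons, if_neg hp]
      simp only [decide_eq_true_eq] at hp
      intro z hz
      rcases List.mem_cons.mp hz with rfl | hz
      · exact hp
      · have := hw z hz; omega

-- covering whites among 'heap pushed with added' + 'ws'' = covering whites among 'heap' + 'added ++ ws''
lemma pv_cov_shift (b' : Int × Int) (heap added ws' : List (Int × Int))
    (hadded : ∀ w ∈ added, w.1 ≤ b'.1) :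
    ((∃ q ∈ added.foldl (fun h w => (-w.2, w.1) :: h) heap, b'.2 ≤ -q.1) ∨
      ∃ w ∈ ws', w.1 ≤ b'.1 ∧ b'.2 ≤ w.2)
    ↔ ((∃ q ∈ heap, b'.2 ≤ -q.1) ∨ ∃ w ∈ added ++ ws', w.1 ≤ b'.1 ∧ b'.2 ≤ w.2) := by
  simp only [pv_mem_foldl_push, List.mem_append]
  constructor
  · rintro (⟨q, hq | ⟨w, hw, rfl⟩, hle⟩ | ⟨w, hw, h1, h2⟩)
    · exact Or.inl ⟨q, hq, hle⟩
    · exact Or.inr ⟨w, Or.inl hw, hadded w hw, by simpa using hle⟩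
    · exact Or.inr ⟨w, Or.inr hw, h1, h2⟩
  · rintro (⟨q, hq, hle⟩ | ⟨w, hw | hw, h1, h2⟩)
    · exact Or.inl ⟨q, Or.inl hq, hle⟩
    · exact Or.inl ⟨(-w.2, w.1), Or.inr ⟨w, hw, rfl⟩, by simpa using h2⟩
    · exact Or.inr ⟨w, hw, h1, h2⟩

-- A's sweep returns True iff some black match is covered by no available white match
lemma pv_sweep_true_iff : ∀ (bl heap ws : List (Int × Int)),
    bl.Pairwise (fun a b => a.1 ≤ b.1) →
    ws.Pairwise (fun a b => a.1 ≤ b.1) →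
    (∀ q ∈ heap, ∀ b ∈ bl, q.2 ≤ b.1) →
    (pvSweep bl heap ws = true ↔
      ∃ b ∈ bl, ¬ ((∃ q ∈ heap, b.2 ≤ -q.1) ∨ ∃ w ∈ ws, w.1 ≤ b.1 ∧ b.2 ≤ w.2)) := by
  intro bl
  induction bl with
  | nil => intro heap ws _ _ _; simp [pvSweep]
  | cons b rest ih =>
    intro heap ws hbl hws hheap
    rcases List.pairwise_cons.mp hbl with ⟨hbrest, hrest⟩
    have hadded : ∀ w ∈ ws.takeWhile (fun w => decide (w.1 ≤ b.1)), w.1 ≤ b.1 := by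
      intro w hw
      have := List.mem_takeWhile_imp hw
      simpa using this
    have hws'gt := pv_dropWhile_gt b.1 ws hws
    have hsplit : ws.takeWhile (fun w => decide (w.1 ≤ b.1)) ++ ws.dropWhile (fun w => decide (w.1 ≤ b.1)) = ws :=
      List.takeWhile_append_dropWhile
    have hws' : (ws.dropWhile (fun w => decide (w.1 ≤ b.1))).Pairwise (fun a b => a.1 ≤ b.1) :=
      hws.sublist (List.dropWhile_sublist _)
    have hWfalse : ¬ ∃ w ∈ ws.dropWhile (fun w => decide (w.1 ≤ b.1)), w.1 ≤ b.1 ∧ b.2 ≤ w.2 := by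
      rintro ⟨w, hw, h1, _⟩
      exact hws'gt w hw h1
    have hcovb : (∃ q ∈ (ws.takeWhile (fun w => decide (w.1 ≤ b.1))).foldl (fun h w => (-w.2, w.1) :: h) heap, b.2 ≤ -q.1)
        ↔ ((∃ q ∈ heap, b.2 ≤ -q.1) ∨ ∃ w ∈ ws, w.1 ≤ b.1 ∧ b.2 ≤ w.2) := by
      have h0 := pv_cov_shift b heap (ws.takeWhile (fun w => decide (w.1 ≤ b.1))) (ws.dropWhile (fun w => decide (w.1 ≤ b.1))) hadded
      rw [hsplit] at h0
      constructor
      · intro hc; exact h0.mp (Or.inl hc)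
      · intro hC
        rcases h0.mpr hC with hc | hW
        · exact hc
        · exact absurd hW hWfalse
    have hheap' : ∀ q ∈ (ws.takeWhile (fun w => decide (w.1 ≤ b.1))).foldl (fun h w => (-w.2, w.1) :: h) heap,
        ∀ b' ∈ rest, q.2 ≤ b'.1 := by
      intro q hq b' hb'
      rcases (pv_mem_foldl_push _ heap q).mp hq with hq | ⟨w, hw, rfl⟩
      · exact hheap q hq b' (List.mem_cons_of_mem _ hb')
      · show w.1 ≤ b'.1
        exact le_trans (hadded w hw) (hbrest b' hb')
    simp only [pvSweep]
    rcases hmin : PySem.List.min2? ((ws.takeWhile (fun w => decide (w.1 ≤ b.1))).foldl (fun h w => (-w.2, w.1) :: h) heap) Prod.fst Prod.snd with _ | top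
    · -- heap empty: return True; and the black b is then uncovered
      simp only [hmin]
      have hH' := pv_min2_none _ hmin
      have hnCb : ¬ ((∃ q ∈ heap, b.2 ≤ -q.1) ∨ ∃ w ∈ ws, w.1 ≤ b.1 ∧ b.2 ≤ w.2) := by
        intro hC
        rcases hcovb.mpr hC with ⟨q, hq, _⟩
        rw [hH'] at hq
        exact absurd hq (List.not_mem_nil)
      constructor
      · intro _
        exact ⟨b, List.mem_cons_self, hnCb⟩
      · intro _
        trivial
    · simp only [hmin]
      rcases pv_min2_some _ _ hmin with ⟨htopmem, htopmin⟩
      by_cases hcond : b.2 ≤ -top.1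
      · -- b is covered: the loop continues
        have hCb := hcovb.mp ⟨top, htopmem, hcond⟩
        have hif : (if ¬ (-top.1 ≥ b.2) then true else pvSweep rest ((ws.takeWhile (fun w => decide (w.1 ≤ b.1))).foldl (fun h w => (-w.2, w.1) :: h) heap) (ws.dropWhile (fun w => decide (w.1 ≤ b.1))))
            = pvSweep rest ((ws.takeWhile (fun w => decide (w.1 ≤ b.1))).foldl (fun h w => (-w.2, w.1) :: h) heap) (ws.dropWhile (fun w => decide (w.1 ≤ b.1))) := by
          rw [if_neg]; omega
        rw [hif]
        rw [ih _ _ hrest hws' hheap']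
        constructor
        · rintro ⟨b', hb', hnc⟩
          refine ⟨b', List.mem_cons_of_mem _ hb', ?_⟩
          intro hC
          apply hnc
          have hadded' : ∀ w ∈ ws.takeWhile (fun w => decide (w.1 ≤ b.1)), w.1 ≤ b'.1 := by
            intro w hw; exact le_trans (hadded w hw) (hbrest b' hb')
          have h0' := pv_cov_shift b' heap (ws.takeWhile (fun w => decide (w.1 ≤ b.1))) (ws.dropWhile (fun w => decide (w.1 ≤ b.1))) hadded'
          rw [hsplit] at h0'
          exact h0'.mpr hC
        · rintro ⟨b0, hb0, hnc⟩
          rcases List.mem_cons.mp hb0 with rfl | hb0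
          · exact absurd hCb hnc
          · refine ⟨b0, hb0, ?_⟩
            intro hc
            apply hnc
            have hadded' : ∀ w ∈ ws.takeWhile (fun w => decide (w.1 ≤ b.1)), w.1 ≤ b0.1 := by
              intro w hw; exact le_trans (hadded w hw) (hbrest b0 hb0)
            have h0' := pv_cov_shift b0 heap (ws.takeWhile (fun w => decide (w.1 ≤ b.1))) (ws.dropWhile (fun w => decide (w.1 ≤ b.1))) hadded'
            rw [hsplit] at h0'
            exact h0'.mp hc
      · -- b is uncovered: return True
        have hnCb : ¬ ((∃ q ∈ heap, b.2 ≤ -q.1) ∨ ∃ w ∈ ws, w.1 ≤ b.1 ∧ b.2 ≤ w.2) := by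
          intro hC
          rcases hcovb.mpr hC with ⟨q, hq, hle⟩
          have := htopmin q hq
          omega
        have hif : (if ¬ (-top.1 ≥ b.2) then true else pvSweep rest ((ws.takeWhile (fun w => decide (w.1 ≤ b.1))).foldl (fun h w => (-w.2, w.1) :: h) heap) (ws.dropWhile (fun w => decide (w.1 ≤ b.1)))) = true := by
          rw [if_pos]; omega
        rw [hif]
        constructor
        · intro _
          exact ⟨b, List.mem_cons_self, hnCb⟩
        · intro _; trivial

-- A's sweep on the sorted match lists = B's nested scan, for arbitrary match lists
lemma pv_core (bm wm : List (Int × Int)) :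
    pvSweep (PySem.List.sorted2 bm Prod.fst Prod.snd) [] (PySem.List.sorted2 wm Prod.fst Prod.snd)
      = bm.any (fun b => ! wm.any (fun w => decide (w.1 ≤ b.1) && decide (b.2 ≤ w.2))) := by
  rw [Bool.eq_iff_iff]
  have hbm := pv_sorted2_pairwise_fst bm
  have hwm := pv_sorted2_pairwise_fst wm
  have h1 := pv_sweep_true_iff _ [] _ hbm hwm (by simp)
  rw [h1]
  simp only [List.not_mem_nil, false_and, exists_const, false_or,
    (PySem.List.sorted2_perm bm Prod.fst Prod.snd false).mem_iff,
    (PySem.List.sorted2_perm wm Prod.fst Prod.snd false).mem_iff,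
    List.any_eq_true, Bool.not_eq_true']
  constructor
  · rintro ⟨b, hb, hnc⟩
    refine ⟨b, hb, ?_⟩
    rw [List.any_eq_false]
    intro w hw
    simp only [Bool.and_eq_true, decide_eq_true_eq, not_and]
    intro h1' h2'
    exact hnc ⟨w, hw, h1', h2'⟩
  · rintro ⟨b, hb, hno⟩
    refine ⟨b, hb, ?_⟩
    rintro ⟨w, hw, h1', h2'⟩
    rw [List.any_eq_false] at hno
    have := hno w hw
    simp only [Bool.and_eq_true, decide_eq_true_eq, not_and] at this
    exact this h1' h2'

lemma pv_has_word_eq (string : String) (blacklist : List String) (whitelist : List String) :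
    has_word string blacklist whitelist = has_word_alt string blacklist whitelist := by
  unfold has_word has_word_alt
  simp only [pv_core, pv_collect_eq]

-- ===== VERDICT (by name: the statement is the Claim_ definition above) =====
theorem has_word_spec : Claim_equal_has_word := by
  intro string blacklist whitelist _
  exact pv_has_word_eq string blacklist whitelist
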